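-- pv_equiv track=rewrite | github.com/alexdev-afk/startup-alexdev-video-summarizer | alexdev-video-summarizer/src/services/knowledge_generator.py | generate_search_terms
-- ===== SOURCE A (Python) =====
-- from typing import Dict, Any, List, Set
--
-- def generate_search_terms(scenes_knowledge: List[Dict[str, Any]]) -> str:
--     """Generate comprehensive search index"""
--     all_terms = set()
--
--     for scene in scenes_knowledge:
--         all_terms.update(scene['searchable_terms'])
--
--     # Group terms alphabetically
--     sorted_terms = sorted(list(all_terms))
--     grouped_terms = {}
--
--     for term in sorted_terms:
--         if term:  # Skip empty terms
--             first_letter = term[0].upper()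
--             if first_letter not in grouped_terms:
--                 grouped_terms[first_letter] = []
--             grouped_terms[first_letter].append(term)
--
--     # Format as searchable index
--     index_content = []
--     for letter in sorted(grouped_terms.keys()):
--         index_content.append(f"**{letter}**: {', '.join(grouped_terms[letter])}")
--
--     return '\n'.join(index_content)
-- ===== SOURCE B (Python) =====
-- def generate_search_terms(scenes_knowledge):
--     """Generate comprehensive search index"""
--     # Single streaming pass: dedupe terms as they arrive and bucket them by
--     # first letter immediately; only each (small) bucket is sorted at the end.
--     buckets = {}
--     seen = set()
--     for scene in scenes_knowledge:
--         for term in scene['searchable_terms']: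
--             if term in seen:
--                 continue
--             seen.add(term)
--             if term:
--                 buckets.setdefault(term[0].upper(), []).append(term)
--     return '\n'.join(
--         "**{}**: {}".format(letter, ', '.join(sorted(buckets[letter])))
--         for letter in sorted(buckets))
-- ===== Notes on version B (the rewrite author's own statement) =====
-- stated objective: alternative
-- what changed: A flattens all terms into a set, globally sorts them, then groups the sorted stream by first letter; B makes one streaming pass that dedupes and buckets each term by term[0].upper() as it arrives, and only at output time sorts the key list and each (small) bucket.
import Mathlib
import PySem

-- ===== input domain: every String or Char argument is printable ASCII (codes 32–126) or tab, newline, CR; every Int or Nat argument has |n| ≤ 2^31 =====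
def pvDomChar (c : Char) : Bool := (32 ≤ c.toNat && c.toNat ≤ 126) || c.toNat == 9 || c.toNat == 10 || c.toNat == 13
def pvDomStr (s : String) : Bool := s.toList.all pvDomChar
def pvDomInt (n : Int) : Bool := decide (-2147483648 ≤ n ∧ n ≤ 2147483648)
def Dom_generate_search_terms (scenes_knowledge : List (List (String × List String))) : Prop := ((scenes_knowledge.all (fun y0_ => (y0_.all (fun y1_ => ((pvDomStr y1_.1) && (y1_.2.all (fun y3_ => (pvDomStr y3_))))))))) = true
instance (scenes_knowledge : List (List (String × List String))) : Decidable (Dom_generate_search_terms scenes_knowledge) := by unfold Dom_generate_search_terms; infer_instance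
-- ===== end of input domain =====

-- B replaces A's flatten-into-set → global sort → group pass by ONE streaming pass that
-- dedupes and buckets each term as it arrives, sorting only each bucket (and the key list)
-- at the end; same return value, different decomposition.

-- ===== PORT A =====
-- scene['searchable_terms'] (first-match dict lookup; Pre_ guarantees the key is present)
def pvLookupTerms (scene : List (String × List String)) : List String :=
  ((PySem.Dict.mk scene).get? "searchable_terms").getD []

-- term[0].upper() — exact for nonempty term (its only use, guarded by `if term` in both Pythons)
def pvFirstUpper (t : String) : String :=
  String.ofList (PySem.Chars.upper (t.toList.take 1))

-- the bucket-append step both Pythons contain verbatim: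
-- A: if fl not in grouped: grouped[fl] = [] ; grouped[fl].append(term)
-- B: buckets.setdefault(fl, []).append(term)
def pvBucketAdd (d : PySem.Dict String (List String)) (t : String) : PySem.Dict String (List String) :=
  d.modify (pvFirstUpper t) [] (· ++ [t])

def generate_search_terms (scenes_knowledge : List (List (String × List String))) : String :=
  let all_terms : PySem.Set String :=
    scenes_knowledge.foldl (fun s scene => PySem.Set.update s (pvLookupTerms scene)) PySem.Set.empty
  let sorted_terms := PySem.List.sorted (all_terms : List String) (fun x => x) false
  let grouped : PySem.Dict String (List String) :=
    sorted_terms.foldl (fun d term => if term ≠ "" then pvBucketAdd d term else d) PySem.Dict.empty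
  let index_content := (PySem.List.sorted grouped.keys (fun x => x) false).map
    (fun letter => "**" ++ letter ++ "**: " ++ PySem.Str.join ", " (grouped.getD letter []))
  PySem.Str.join "\n" index_content

-- ===== PORT B =====
def generate_search_terms_alt (scenes_knowledge : List (List (String × List String))) : String :=
  let st :=
    scenes_knowledge.foldl (fun (p : PySem.Dict String (List String) × PySem.Set String) scene =>
      (pvLookupTerms scene).foldl (fun q term =>
        if PySem.Set.contains q.2 term then q
        else ((if term ≠ "" then pvBucketAdd q.1 term else q.1), PySem.Set.add q.2 term)) p)
      (PySem.Dict.empty, PySem.Set.empty)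
  let buckets := st.1
  PySem.Str.join "\n" ((PySem.List.sorted buckets.keys (fun x => x) false).map
    (fun letter => "**" ++ letter ++ "**: " ++
      PySem.Str.join ", " (PySem.List.sorted (buckets.getD letter []) (fun x => x) false)))

-- ===== PRECONDITION & SPEC =====
-- Pre_ excludes exactly the inputs where scene['searchable_terms'] raises KeyError
-- (both Pythons raise there): every scene must carry the key 'searchable_terms'.
def Pre_generate_search_terms (scenes_knowledge : List (List (String × List String))) : Prop :=
  ∀ scene ∈ scenes_knowledge, "searchable_terms" ∈ scene.map Prod.fst
instance (scenes_knowledge : List (List (String × List String))) : Decidable (Pre_generate_search_terms scenes_knowledge) := by unfold Pre_generate_search_terms; infer_instance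

def pvWitness_generate_search_terms : (List (List (String × List String))) :=
  [[("searchable_terms", ["apple", "Bob"])], [("searchable_terms", ["zed"])]]

def Spec_generate_search_terms (scenes_knowledge : List (List (String × List String))) (out : String) : Prop := out = generate_search_terms_alt scenes_knowledge
instance (scenes_knowledge : List (List (String × List String))) (out : String) : Decidable (Spec_generate_search_terms scenes_knowledge out) := by unfold Spec_generate_search_terms; infer_instance

-- ===== CLAIM (what is proved, stated in full; the proofs are below) =====
def Claim_equal_generate_search_terms : Prop := ∀ (scenes_knowledge : List (List (String × List String))), Dom_generate_search_terms scenes_knowledge → Pre_generate_search_terms scenes_knowledge → Spec_generate_search_terms scenes_knowledge (generate_search_terms scenes_knowledge)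

-- ===== LEMMAS AND PROOFS =====

-- A's grouping step (identical in both ports)
def pvStep (d : PySem.Dict String (List String)) (term : String) : PySem.Dict String (List String) :=
  if term ≠ "" then pvBucketAdd d term else d

-- a fold over scenes that folds each scene's term list is a fold over the flattened stream
theorem pv_foldl_flat {β : Type} (f : β → String → β) (sk : List (List (String × List String))) (b : β) :
    sk.foldl (fun b scene => (pvLookupTerms scene).foldl f b) b
      = (sk.flatMap pvLookupTerms).foldl f b := by
  simp [List.flatMap_def, List.foldl_flatten, List.foldl_map]

-- A's set accumulation is the fold of Set.add over the flattened stream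
theorem pv_universe (sk : List (List (String × List String))) :
    sk.foldl (fun s scene => PySem.Set.update s (pvLookupTerms scene)) PySem.Set.empty
      = (sk.flatMap pvLookupTerms).foldl PySem.Set.add [] := by
  suffices h : ∀ (s : PySem.Set String),
      sk.foldl (fun s scene => PySem.Set.update s (pvLookupTerms scene)) s
        = sk.foldl (fun s scene => (pvLookupTerms scene).foldl PySem.Set.add s) s by
    rw [h, pv_foldl_flat]; rfl
  intro s
  simp only [PySem.Set.update_eq_foldl]

-- invariant of B's paired fold: the dict is always the pvStep-fold of the seen list
theorem pv_pairfold (L : List String) (s : PySem.Set String) :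
    L.foldl (fun q term =>
        if PySem.Set.contains q.2 term then q
        else ((if term ≠ "" then pvBucketAdd q.1 term else q.1), PySem.Set.add q.2 term))
      (s.foldl pvStep PySem.Dict.empty, s)
      = ((L.foldl PySem.Set.add s).foldl pvStep PySem.Dict.empty, L.foldl PySem.Set.add s) := by
  induction L generalizing s with
  | nil => rfl
  | cons t L ih =>
    simp only [List.foldl_cons]
    by_cases h : t ∈ s
    · rw [(PySem.Set.contains_iff s t).2 h, if_pos rfl, PySem.Set.add_of_mem h]
      exact ih s
    · have hc : PySem.Set.contains s t = false := by
        rw [Bool.eq_false_iff]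
        intro h'; exact h ((PySem.Set.contains_iff s t).1 h')
      have hstep : (s ++ [t]).foldl pvStep PySem.Dict.empty
          = (if t ≠ "" then pvBucketAdd (s.foldl pvStep PySem.Dict.empty) t
             else s.foldl pvStep PySem.Dict.empty) := by
        rw [List.foldl_append]; rfl
      rw [hc, if_neg Bool.false_ne_true, PySem.Set.add_of_not_mem h, ← hstep]
      exact ih (s ++ [t])

-- the pvStep fold is the modify fold over the nonempty terms
theorem pv_step_filter (ys : List String) (d : PySem.Dict String (List String)) :
    ys.foldl pvStep d
      = (ys.filter (fun t => !(t == ""))).foldl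
          (fun d t => d.modify (pvFirstUpper t) [] (· ++ [t])) d := by
  induction ys generalizing d with
  | nil => rfl
  | cons t ys ih =>
    simp only [List.foldl_cons, List.filter_cons]
    by_cases h : t = ""
    · subst h
      have hb : (!(("" : String) == "")) = false := by simp
      rw [hb, if_neg Bool.false_ne_true]
      have hs : pvStep d "" = d := if_neg (by simp)
      rw [hs]; exact ih d
    · have hb : (!(t == "")) = true := by simp [h]
      rw [hb, if_pos rfl, List.foldl_cons]
      have hs : pvStep d t = pvBucketAdd d t := if_pos h
      rw [hs]; exact ih (pvBucketAdd d t)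

-- the keys of the grouping dict: first-letter uppercases of the nonempty terms, deduped in order
theorem pv_keys (ys : List String) :
    (ys.foldl pvStep PySem.Dict.empty).keys
      = PySem.Set.ofList ((ys.filter (fun t => !(t == ""))).map pvFirstUpper) := by
  rw [pv_step_filter]
  rw [PySem.Dict.keys_foldl_modify_key (ys.filter (fun t => !(t == ""))) pvFirstUpper []
    (fun _ t v => v ++ [t]) PySem.Dict.empty]
  rw [PySem.Dict.keys_empty, PySem.Set.update_nil_left]

-- the bucket of a letter k: the nonempty terms whose uppercased first letter is k, in stream order
theorem pv_getD (ys : List String) (k : String) (d : PySem.Dict String (List String)) :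
    (ys.foldl pvStep d).getD k []
      = d.getD k [] ++ ys.filter (fun t => !(t == "") && (pvFirstUpper t == k)) := by
  induction ys generalizing d with
  | nil => simp
  | cons t ys ih =>
    simp only [List.foldl_cons, List.filter_cons]
    by_cases h : t = ""
    · subst h
      have hb : ((!(("" : String) == "")) && (pvFirstUpper "" == k)) = false := by simp
      rw [hb, if_neg Bool.false_ne_true]
      have hs : pvStep d "" = d := if_neg (by simp)
      rw [hs]; exact ih d
    · have hs : pvStep d t = pvBucketAdd d t := if_pos h
      rw [hs, ih (pvBucketAdd d t)]
      by_cases hk : pvFirstUpper t = k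
      · subst hk
        have hb : ((!(t == "")) && (pvFirstUpper t == pvFirstUpper t)) = true := by simp [h]
        rw [hb, if_pos rfl]
        have hg : (pvBucketAdd d t).getD (pvFirstUpper t) [] = d.getD (pvFirstUpper t) [] ++ [t] := by
          rw [pvBucketAdd, PySem.Dict.getD_modify, if_pos rfl]
        rw [hg, List.append_assoc, List.singleton_append]
      · have hb : ((!(t == "")) && (pvFirstUpper t == k)) = false := by simp [hk]
        rw [hb, if_neg Bool.false_ne_true]
        have hg : (pvBucketAdd d t).getD k [] = d.getD k [] := by
          rw [pvBucketAdd, PySem.Dict.getD_modify, if_neg (fun he => hk he.symm)]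
        rw [hg]

-- sets built from permuted streams are permutations of each other
theorem pv_ofList_perm {xs ys : List String} (h : xs.Perm ys) :
    (PySem.Set.ofList xs : List String).Perm (PySem.Set.ofList ys) := by
  refine (List.perm_ext_iff_of_nodup (PySem.Set.nodup_ofList xs) (PySem.Set.nodup_ofList ys)).2 ?_
  intro a
  rw [PySem.Set.mem_ofList, PySem.Set.mem_ofList]
  exact ⟨fun ha => h.mem_iff.1 ha, fun ha => h.mem_iff.2 ha⟩

theorem generate_search_terms_eq_alt (sk : List (List (String × List String))) :
    generate_search_terms sk = generate_search_terms_alt sk := by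
  unfold generate_search_terms generate_search_terms_alt
  simp only []
  set L : List String := sk.flatMap pvLookupTerms with hL
  set U : List String := PySem.Set.ofList L with hUdef
  set S : List String := PySem.List.sorted U (fun x => x) false with hS
  have hSperm : S.Perm U := PySem.List.sorted_perm U (fun x => x) false
  have hSlt : S.Pairwise (· < ·) := by
    rw [hS, hUdef]; exact PySem.List.sorted_ofList_pairwise_lt L
  have hU : sk.foldl (fun s scene => PySem.Set.update s (pvLookupTerms scene)) PySem.Set.empty
      = U := by
    rw [pv_universe, hUdef, PySem.Set.ofList_eq_foldl]
  have hB : sk.foldl (fun (p : PySem.Dict String (List String) × PySem.Set String) scene =>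
        (pvLookupTerms scene).foldl (fun q term =>
          if PySem.Set.contains q.2 term then q
          else ((if term ≠ "" then pvBucketAdd q.1 term else q.1), PySem.Set.add q.2 term)) p)
      (PySem.Dict.empty, PySem.Set.empty)
      = (U.foldl pvStep PySem.Dict.empty, U) := by
    rw [pv_foldl_flat, hUdef, PySem.Set.ofList_eq_foldl]
    exact pv_pairfold L []
  have hA : (PySem.List.sorted (sk.foldl (fun s scene =>
        PySem.Set.update s (pvLookupTerms scene)) PySem.Set.empty : List String) (fun x => x) false)
      = S := by rw [hU]
  rw [hA, hB]
  have hstepA : (S.foldl (fun d term => if term ≠ "" then pvBucketAdd d term else d)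
      PySem.Dict.empty) = S.foldl pvStep PySem.Dict.empty := rfl
  rw [hstepA]
  -- keys agree after sorting
  have hkeys : PySem.List.sorted (S.foldl pvStep PySem.Dict.empty).keys (fun x => x) false
      = PySem.List.sorted (U.foldl pvStep PySem.Dict.empty).keys (fun x => x) false := by
    rw [pv_keys, pv_keys]
    exact (PySem.List.sorted_id_eq_sorted_id_iff_perm _ _).2
      (pv_ofList_perm ((hSperm.filter _).map pvFirstUpper))
  rw [hkeys]
  -- buckets agree letter by letter
  have hbucket : ∀ k : String,
      (S.foldl pvStep PySem.Dict.empty).getD k []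
        = PySem.List.sorted ((U.foldl pvStep PySem.Dict.empty).getD k []) (fun x => x) false := by
    intro k
    rw [pv_getD, pv_getD]
    simp only [PySem.Dict.getD_empty, List.nil_append]
    exact (PySem.List.sorted_eq_of_perm_of_pairwise_lt _ _ _
      (hSperm.filter _) (hSlt.filter _)).symm
  congr 1
  exact List.map_congr_left (fun k _ => by rw [hbucket k])

-- ===== VERDICT (by name: the statement is the Claim_ definition above) =====
theorem generate_search_terms_spec : Claim_equal_generate_search_terms := by
  intro sk _ _
  unfold Spec_generate_search_terms
  exact generate_search_terms_eq_alt sk
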